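-- pv_equiv track=rewrite | github.com/sndnyang/zhimind | wsgi/mindmap/utility.py | find_right_next
-- ===== SOURCE A (Python) =====
-- def find_right_next(s, i, n, char):
--     if i == len(s):
--         return i
--
--     if s[i] == '{':
--         return find_right_next(s, i + 1, n + 1, char)
--     elif s[i] in '%' + char and n == 0:
--         return i
--     elif s[i] == '}' and n > 0:
--         return find_right_next(s, i + 1, n - 1, char)
--     else:
--         return find_right_next(s, i + 1, n, char)
-- ===== SOURCE B (Python) =====
-- def find_right_next(s, i, n, char):
--     # Iterative state machine instead of recursion: one step per character.
--     # The top-level-delimiter test is hoisted to the front (a '{' is never a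
--     # delimiter hit, since it opens a nesting level instead), then the depth
--     # counter is updated; no call stack, delims is built once.
--     delims = '%' + char
--     depth = n
--     while i != len(s):
--         c = s[i]
--         if depth == 0 and c in delims and c != '{':
--             return i
--         if c == '{':
--             depth += 1
--         elif c == '}' and depth > 0:
--             depth -= 1
--         i += 1
--     return i
-- ===== Notes on version B (the rewrite author's own statement) =====
-- stated objective: alternative
-- what changed: Replaced A's tail recursion (one Python call frame per character) with an iterative state machine: a while-loop over an index and a local depth counter, with the top-level-delimiter test hoisted before the depth update (sound because '{' opens a nesting level and is never a delimiter hit in A) and the delimiter string '%'+char built once; B cannot hit Python's recursion limit.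
import Mathlib
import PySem

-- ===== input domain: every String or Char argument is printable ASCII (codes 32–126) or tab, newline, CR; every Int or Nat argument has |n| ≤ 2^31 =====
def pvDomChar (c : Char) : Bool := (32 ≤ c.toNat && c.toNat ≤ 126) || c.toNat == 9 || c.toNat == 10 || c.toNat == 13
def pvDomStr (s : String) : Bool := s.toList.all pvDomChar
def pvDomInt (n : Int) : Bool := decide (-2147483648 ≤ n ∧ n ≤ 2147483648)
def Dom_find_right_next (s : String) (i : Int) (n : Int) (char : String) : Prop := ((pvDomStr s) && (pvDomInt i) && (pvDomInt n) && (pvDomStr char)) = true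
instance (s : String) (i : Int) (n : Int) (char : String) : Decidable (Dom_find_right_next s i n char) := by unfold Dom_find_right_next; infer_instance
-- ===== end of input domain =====

-- B replaces A's recursion by an iterative state machine with the top-level-delimiter guard hoisted first (alternative decomposition; return value only).


-- ===== PORT A =====
-- A's recursion, on the code-point list; the structural `fuel` (= len(s) - i + 1 at entry) only bounds the
-- recursion depth — each step is A's code verbatim; the `none` arm of pyGet? is Python's IndexError (outside Pre_).
def frnA (s : List Char) (char : List Char) : Nat → Int → Int → Int
  | 0, i, _ => i
  | fuel + 1, i, n =>
    if i = (s.length : Int) then i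
    else
      match PySem.List.pyGet? s i with
      | none => 0  -- IndexError in Python; outside Pre_
      | some c =>
        if c = '{' then frnA s char fuel (i + 1) (n + 1)
        else if PySem.Chars.isIn [c] ('%' :: char) && n == 0 then i
        else if c = '}' && n > 0 then frnA s char fuel (i + 1) (n - 1)
        else frnA s char fuel (i + 1) n

def find_right_next (s : String) (i : Int) (n : Int) (char : String) : Int :=
  frnA s.toList char.toList (((s.toList.length : Int) - i).toNat + 1) i n

-- ===== PORT B =====
-- B's while-loop as a state machine: the loop state is `.inl (i, depth)`, an early `return r` (and the
-- IndexError, outside Pre_) is the absorbing state `.inr r`; one application of frnStep is one loop pass.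
def frnStep (s : List Char) (delims : List Char) : (Int × Int) ⊕ Int → (Int × Int) ⊕ Int
  | .inr r => .inr r
  | .inl (j, depth) =>
    if j = (s.length : Int) then .inr j
    else
      match PySem.List.pyGet? s j with
      | none => .inr 0  -- IndexError in Python; outside Pre_
      | some c =>
        if depth == 0 && PySem.Chars.isIn [c] delims && !(c == '{') then .inr j
        else if c = '{' then .inl (j + 1, depth + 1)
        else if c = '}' && depth > 0 then .inl (j + 1, depth - 1)
        else .inl (j + 1, depth)

def frnRun : (Int × Int) ⊕ Int → Int
  | .inl (j, _) => j
  | .inr r => r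

def find_right_next_alt (s : String) (i : Int) (n : Int) (char : String) : Int :=
  frnRun ((frnStep s.toList ('%' :: char.toList))^[((s.toList.length : Int) - i).toNat + 1] (.inl (i, n)))

-- ===== PRECONDITION & SPEC =====
-- Pre_ excludes exactly the indices where Python A raises IndexError: i < -len(s) or i > len(s).
def Pre_find_right_next (s : String) (i : Int) (n : Int) (char : String) : Prop :=
  -(s.toList.length : Int) ≤ i ∧ i ≤ (s.toList.length : Int)
instance (s : String) (i : Int) (n : Int) (char : String) : Decidable (Pre_find_right_next s i n char) := by unfold Pre_find_right_next; infer_instance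

def pvWitness_find_right_next : String × Int × Int × String := ("ab{c%d}e%f", 0, 0, "#")

def Spec_find_right_next (s : String) (i : Int) (n : Int) (char : String) (out : Int) : Prop := out = find_right_next_alt s i n char
instance (s : String) (i : Int) (n : Int) (char : String) (out : Int) : Decidable (Spec_find_right_next s i n char out) := by unfold Spec_find_right_next; infer_instance

-- ===== CLAIM (what is proved, stated in full; the proofs are below) =====
def Claim_equal_find_right_next : Prop := ∀ (s : String) (i : Int) (n : Int) (char : String), Dom_find_right_next s i n char → Pre_find_right_next s i n char → Spec_find_right_next s i n char (find_right_next s i n char)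

-- ===== LEMMAS AND PROOFS =====
-- `.inr` (an early return) is absorbing for the iterated step function.
lemma frnStep_iterate_inr (s delims : List Char) (f : Nat) (r : Int) :
    (frnStep s delims)^[f] (.inr r) = .inr r := by
  induction f with
  | zero => rfl
  | succ g ih => rw [Function.iterate_succ_apply, frnStep, ih]

-- With the same step budget, A's recursion and B's iterated state machine compute the same index.
lemma frnA_eq_run (s char : List Char) :
    ∀ (fuel : Nat) (i n : Int),
      frnA s char fuel i n = frnRun ((frnStep s ('%' :: char))^[fuel] (.inl (i, n))) := by
  intro fuel
  induction fuel with
  | zero => intro i n; rfl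
  | succ f ih =>
    intro i n
    rw [frnA, Function.iterate_succ_apply, frnStep]
    by_cases he : i = (s.length : Int)
    · rw [if_pos he, if_pos he, frnStep_iterate_inr]; rfl
    · rw [if_neg he, if_neg he]
      cases hg : PySem.List.pyGet? s i with
      | none => rw [frnStep_iterate_inr]; rfl
      | some c =>
        dsimp only
        by_cases hb : c = '{'
        · have : ¬ (n == 0 && PySem.Chars.isIn [c] ('%' :: char) && !(c == '{')) = true := by
            simp [hb]
          rw [if_pos hb, if_neg this, if_pos hb, ih]
        · by_cases hd : (PySem.Chars.isIn [c] ('%' :: char) && n == 0) = true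
          · have : (n == 0 && PySem.Chars.isIn [c] ('%' :: char) && !(c == '{')) = true := by
              simp_all [Bool.and_comm]
            rw [if_neg hb, if_pos hd, if_pos this, frnStep_iterate_inr]; rfl
          · have : ¬ (n == 0 && PySem.Chars.isIn [c] ('%' :: char) && !(c == '{')) = true := by
              simp_all [Bool.and_comm]
            rw [if_neg hb, if_neg hd, if_neg this, if_neg hb]
            split_ifs <;> rw [ih]

theorem find_right_next_spec : Claim_equal_find_right_next := by
  unfold Claim_equal_find_right_next
  intro s i n char _ _
  unfold Spec_find_right_next find_right_next find_right_next_alt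
  exact frnA_eq_run s.toList char.toList _ i n
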